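-- pv_equiv track=rewrite | github.com/yeongsummer/Algorithm | Python/Programmers/DP_express_N.py | solution
-- ===== SOURCE A (Python) =====
-- def solution(N, number):
--     answer = -1
--     dp = []
--
--     for i in range(1,9) :
--         all_case = {int(str(N)*i)}
--
--         for j in range(0,i-1):
--             for op1 in dp[j]:
--                 for op2 in dp[-j-1] :
--                     all_case.add(op1 - op2)
--                     all_case.add(op1 + op2)
--                     all_case.add(op1 * op2)
--                     if op2 != 0:
--                         all_case.add(op1 // op2)
--
--         if number in all_case:
--             answer = i
--             break
--
--         dp.append(all_case)
--     return answer
-- ===== SOURCE B (Python) =====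
-- def solution(N, number):
--     memo = {}
--
--     def reachable(i):
--         # set of values expressible using the digit N exactly i times
--         if i in memo:
--             return memo[i]
--         s = {int(str(N) * i)}
--         for a in range(1, i):
--             for x in reachable(a):
--                 for y in reachable(i - a):
--                     s.add(x - y)
--                     s.add(x + y)
--                     s.add(x * y)
--                     if y != 0:
--                         s.add(x // y)
--         memo[i] = s
--         return s
--
--     for i in range(1, 9):
--         if number in reachable(i):
--             return i
--     return -1
-- ===== Notes on version B (the rewrite author's own statement) =====
-- stated objective: alternative
-- what changed: Replaces A's imperative dp-list accumulation with negative back-indexing and an early-break loop by a memoized recursive helper reachable(i) (set of values using digit N exactly i times, combining reachable(a) with reachable(i-a)), with the answer found by a simple search over i in 1..8.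
import Mathlib
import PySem

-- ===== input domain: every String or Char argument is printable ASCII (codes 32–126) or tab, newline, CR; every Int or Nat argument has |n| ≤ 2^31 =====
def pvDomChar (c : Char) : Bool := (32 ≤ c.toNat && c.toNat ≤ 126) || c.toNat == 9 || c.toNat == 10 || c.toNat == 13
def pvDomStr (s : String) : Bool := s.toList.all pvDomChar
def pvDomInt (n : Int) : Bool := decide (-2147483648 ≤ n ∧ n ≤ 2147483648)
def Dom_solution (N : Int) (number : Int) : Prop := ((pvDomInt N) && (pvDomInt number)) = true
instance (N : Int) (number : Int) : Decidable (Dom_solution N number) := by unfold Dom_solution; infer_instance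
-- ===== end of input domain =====

-- B replaces A's imperative dp-list accumulation (with negative back-indexing and break)
-- by a memoized recursive helper reachable(i); same results, alternative decomposition.

-- ===== PORT A =====

-- int(str(N)*i): parse i concatenated copies of str(N); .getD 0 is only reached where
-- Python raises ValueError (N < 0 and i ≥ 2), which Pre_solution excludes.
def seedVal (N : Int) (i : Nat) : Int :=
  (PySem.Int.ofChars? ((List.replicate i (PySem.Int.toChars N)).flatten)).getD 0

-- the four set insertions of the innermost loop body
def addOps (acc : PySem.Set Int) (op1 op2 : Int) : PySem.Set Int :=
  let acc := PySem.Set.add acc (op1 - op2)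
  let acc := PySem.Set.add acc (op1 + op2)
  let acc := PySem.Set.add acc (op1 * op2)
  if op2 ≠ 0 then PySem.Set.add acc (PySem.Int.floordiv op1 op2) else acc

-- the all_case set built at step i from the dp list (A's j-loop over range(0, i-1))
def allCaseA (N : Int) (dp : List (PySem.Set Int)) (i : Int) : PySem.Set Int :=
  (PySem.List.pyRange 0 (i - 1) 1).foldl
    (fun acc j =>
      let s1 := (PySem.List.pyGet? dp j).getD []
      let s2 := (PySem.List.pyGet? dp (-j - 1)).getD []
      s1.foldl (fun acc op1 => s2.foldl (fun acc op2 => addOps acc op1 op2) acc) acc)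
    (PySem.Set.ofList [seedVal N i.toNat])

-- A's main loop: for i in range(1,9) with break (early return of answer = i)
def loopA (N number : Int) : List Int → List (PySem.Set Int) → Int
  | [], _ => -1
  | i :: rest, dp =>
    let allCase := allCaseA N dp i
    if number ∈ allCase then i else loopA N number rest (dp ++ [allCase])

def solution (N : Int) (number : Int) : Int :=
  loopA N number (PySem.List.pyRange 1 9 1) []

-- ===== PORT B =====

-- B's inner combination: for x in s1: for y in s2: add the four results
def combineB (acc : PySem.Set Int) (s1 s2 : PySem.Set Int) : PySem.Set Int :=
  s1.foldl (fun acc x => s2.foldl (fun acc y => addOps acc x y) acc) acc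

-- reachable(i): values expressible with the digit N used exactly i times
-- (Source B memoizes this recursion in a dict; the memo only caches, it never changes values)
def reach (N : Int) : Nat → PySem.Set Int
  | i =>
    (List.range' 1 (i - 1)).attach.foldl
      (fun acc a => combineB acc (reach N a.1) (reach N (i - a.1)))
      (PySem.Set.ofList [seedVal N i])
  termination_by i => i
  decreasing_by
    all_goals
      rename_i ha; have h := List.mem_range'_1.mp a.2; omega

def searchB (N number : Int) : List Nat → Int
  | [] => -1
  | i :: rest => if number ∈ reach N i then (i : Int) else searchB N number rest

def solution_alt (N : Int) (number : Int) : Int :=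
  searchB N number (List.range' 1 8)

-- ===== PRECONDITION & SPEC =====
-- Pre_ excludes exactly the inputs where A raises ValueError: N < 0 with number ≠ N
-- (int(str(N)*i) fails for i ≥ 2 once the first repetition does not already contain number).
def Pre_solution (N : Int) (number : Int) : Prop := 0 ≤ N ∨ number = N
instance (N : Int) (number : Int) : Decidable (Pre_solution N number) := by
  unfold Pre_solution; infer_instance

def pvWitness_solution : Int × Int := (5, 12)

def Spec_solution (N : Int) (number : Int) (out : Int) : Prop := out = solution_alt N number
instance (N : Int) (number : Int) (out : Int) : Decidable (Spec_solution N number out) := by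
  unfold Spec_solution; infer_instance

-- ===== CLAIM (what is proved, stated in full; the proofs are below) =====
def Claim_equal_solution : Prop :=
  ∀ (N : Int) (number : Int), Dom_solution N number → Pre_solution N number →
    Spec_solution N number (solution N number)


-- ===== LEMMAS AND PROOFS =====

-- the all_case set A builds at step k+1 from dp = [reach 1, …, reach k] is exactly reach (k+1)
theorem allCase_eq (N : Int) (k : Nat) :
    allCaseA N ((List.range' 1 k).map (reach N)) ((k : Int) + 1) = reach N (k + 1) := by
  unfold allCaseA
  rw [reach]
  have h1 : ((k : Int) + 1 - 1) = (k : Int) := by ring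
  have h2 : ((k : Int) + 1).toNat = k + 1 := by omega
  rw [h1, h2, PySem.List.pyRange_zero_natCast]
  rw [List.foldl_attach (l := List.range' 1 (k + 1 - 1))
        (f := fun acc x => combineB acc (reach N x) (reach N (k + 1 - x)))]
  conv_rhs => rw [show List.range' 1 (k + 1 - 1) = List.range' 1 k from rfl,
                  List.range'_eq_map_range, List.foldl_map]
  conv_lhs => rw [List.foldl_map]
  apply List.foldl_ext
  intro acc j hj
  have hjk : j < k := by have := List.mem_range.mp hj; omega
  have hlen : ((List.range' 1 k).map (reach N)).length = k := by simp
  have hs1 : (PySem.List.pyGet? ((List.range' 1 k).map (reach N)) (↑j)).getD [] =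
      reach N (1 + j) := by
    rw [PySem.List.pyGet?_natCast]
    have hr : (List.range' 1 k)[j]? = some (1 + j) := by
      rw [List.getElem?_eq_getElem (by simpa using hjk)]
      simp
    simp [List.getElem?_map, hr]
  have hs2 : (PySem.List.pyGet? ((List.range' 1 k).map (reach N)) (-(↑j) - 1)).getD [] =
      reach N (k + 1 - (1 + j)) := by
    rw [show (-(j : Int) - 1) = -((j + 1 : Nat) : Int) by push_cast; ring,
        PySem.List.pyGet?_neg_natCast _ (j + 1) (by omega) (by omega)]
    rw [hlen]
    have hlt : k - (j + 1) < k := by omega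
    have hr : (List.range' 1 k)[k - (j + 1)]? = some (1 + (k - (j + 1))) := by
      rw [List.getElem?_eq_getElem (by simpa using hlt)]
      simp
    rw [List.getElem?_map, hr]
    simp only [Option.map_some, Option.getD_some]
    congr 1
    omega
  simp only [hs1, hs2, combineB]

-- A's loop with dp = [reach 1, …, reach k] and remaining range [k+1, 9) matches B's search
theorem loop_aux (N number : Int) (m : Nat) : ∀ k, k + m = 8 →
    loopA N number (PySem.List.pyRange ((k : Int) + 1) 9 1) ((List.range' 1 k).map (reach N)) =
      searchB N number (List.range' (k + 1) m) := by
  induction m with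
  | zero =>
    intro k hk
    rw [PySem.List.pyRange_one_eq_nil (by omega)]
    simp [loopA, searchB, List.range']
  | succ m ih =>
    intro k hk
    rw [PySem.List.pyRange_one_cons (by omega : (k : Int) + 1 < 9),
        show List.range' (k + 1) (m + 1) = (k + 1) :: List.range' (k + 2) m from rfl]
    simp only [loopA, searchB, allCase_eq]
    by_cases hmem : number ∈ reach N (k + 1)
    · simp [hmem]
    · simp only [hmem, if_false]
      have hdp : (List.range' 1 k).map (reach N) ++ [reach N (k + 1)] =
          (List.range' 1 (k + 1)).map (reach N) := by
        rw [List.range'_1_concat]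
        simp [Nat.add_comm 1 k]
      rw [hdp]
      have := ih (k + 1) (by omega)
      rw [show ((k + 1 : Nat) : Int) + 1 = (k : Int) + 1 + 1 by push_cast; ring] at this
      exact this

-- ===== VERDICT (by name: the statement is the Claim_ definition above) =====
theorem solution_spec : Claim_equal_solution := by
  intro N number _ _
  unfold Spec_solution solution solution_alt
  have h := loop_aux N number 8 0 (by omega)
  simpa using h
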